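-- pv_equiv track=rewrite | github.com/TerSva/UcetniProgramPrautBi | services/queries/vykazy_query.py | _najdi_prefixy_vzz
-- ===== SOURCE A (Python) =====
-- VZZ_RADKY: tuple[tuple, ...] = (
--     ("I.",     "Tržby z prodeje výrobků a služeb",  ("601", "602"), "V", 1),
--     ("II.",    "Tržby za zboží",                    ("604",), "V", 1),
--     ("A.",     "Výkonová spotřeba",                 (), "N_group", 1),
--     ("A.1.",   "  Náklady vynaložené na prodané zboží", ("504",), "N", 2),
--     ("A.2.",   "  Spotřeba materiálu a energie",   ("501", "502"), "N", 2),
--     ("A.3.",   "  Služby",                          ("511", "512", "513", "518"), "N", 2),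
--     ("B.",     "Změna stavu zásob vlastní činnosti", (), "N", 1),
--     ("C.",     "Aktivace",                          (), "N", 1),
--     ("D.",     "Osobní náklady",                    ("521", "524", "527"), "N", 1),
--     ("E.",     "Úpravy hodnot v provozní oblasti",  ("551",), "N", 1),
--     ("III.",   "Ostatní provozní výnosy",           ("644", "648"), "V", 1),
--     ("F.",     "Ostatní provozní náklady",          ("538", "543", "544", "545", "548", "549"), "N", 1),
--     ("*",      "Provozní výsledek hospodaření",     (), "sum_provozni", 1),
--     ("IV.",    "Výnosy z dlouhodobého finančního majetku", (), "V", 1),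
--     ("G.",     "Náklady vynaložené na prodané podíly", (), "N", 1),
--     ("V.",     "Výnosy z ostatního dlouhodobého finančního majetku", (), "V", 1),
--     ("H.",     "Náklady související s ostatním DFM", (), "N", 1),
--     ("VI.",    "Výnosové úroky a podobné výnosy",   ("662",), "V", 1),
--     ("I.",     "Úpravy hodnot a rezervy ve fin. oblasti", (), "N", 1),
--     ("J.",     "Nákladové úroky a podobné náklady", ("562",), "N", 1),
--     ("VII.",   "Ostatní finanční výnosy",           ("663", "668"), "V", 1),
--     ("K.",     "Ostatní finanční náklady",          ("563", "568"), "N", 1),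
--     ("**fin",  "Finanční výsledek hospodaření",     (), "sum_financni", 1),
--     ("***pred", "Výsledek hospodaření před zdaněním", (), "sum_pred_dani", 1),
--     ("L.",     "Daň z příjmů",                      ("591", "595"), "N", 1),
--     ("**pod",  "Výsledek hospodaření po zdanění",   (), "sum_po_dani", 1),
--     ("****",   "Výsledek hospodaření za účetní období", (), "sum_celkem", 1),
-- )
--
-- def _najdi_prefixy_vzz(
--     oznaceni: str,
-- ) -> tuple[tuple[str, ...], dict[str, str]]:
--     """Vrátí (prefixy, druhy_pre_ucet) pro řádek VZZ.
--
--     Pro sum_* řádky agreguje prefixy všech leaf řádků (`druh`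
--     in {'V', 'N', 'N_group'}). `druhy` mapuje prefix → 'V'/'N',
--     aby drilldown věděl znaménko.
--     """
--     # Najdi řádek
--     row = next(
--         (r for r in VZZ_RADKY if r[0] == oznaceni), None,
--     )
--     if row is None:
--         return tuple(), {}
--     oz, _, prefixy, druh, _ = row
--
--     if druh in ("V", "N", "N_group") and prefixy:
--         return prefixy, {p: druh for p in prefixy}
--
--     # Sumové řádky — agregace všech VZZ leaf řádků
--     # (zjednodušené: zahrnujeme všechny řádky s prefixy)
--     if druh.startswith("sum"):
--         agreg: list[str] = []
--         druhy: dict[str, str] = {}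
--         for r in VZZ_RADKY:
--             d = r[3]
--             if d in ("V", "N", "N_group") and r[2]:
--                 for p in r[2]:
--                     if p not in druhy:
--                         agreg.append(p)
--                         druhy[p] = d
--         return tuple(agreg), druhy
--
--     return prefixy, {p: druh for p in prefixy}
-- ===== SOURCE B (Python) =====
-- # Restructured data: leaf rows (oznaceni -> (sign, prefixes)), in table order,
-- # and the set of sum rows.  Rows without prefixes behave exactly like a miss
-- # in the original (they return ((), {})), so they need no entry at all.
-- _LEAF = {
--     "I.":   ("V", ("601", "602")),
--     "II.":  ("V", ("604",)),
--     "A.1.": ("N", ("504",)),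
--     "A.2.": ("N", ("501", "502")),
--     "A.3.": ("N", ("511", "512", "513", "518")),
--     "D.":   ("N", ("521", "524", "527")),
--     "E.":   ("N", ("551",)),
--     "III.": ("V", ("644", "648")),
--     "F.":   ("N", ("538", "543", "544", "545", "548", "549")),
--     "VI.":  ("V", ("662",)),
--     "J.":   ("N", ("562",)),
--     "VII.": ("V", ("663", "668")),
--     "K.":   ("N", ("563", "568")),
--     "L.":   ("N", ("591", "595")),
-- }
-- _SUM = ("*", "**fin", "***pred", "**pod", "****")
--
--
-- def _najdi_prefixy_vzz(
--     oznaceni: str,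
-- ) -> tuple[tuple[str, ...], dict[str, str]]:
--     if oznaceni in _LEAF:
--         druh, prefixy = _LEAF[oznaceni]
--         return prefixy, {p: druh for p in prefixy}
--     if oznaceni in _SUM:
--         # all leaf prefixes are distinct, so no dedup pass is needed
--         druhy = {p: druh for druh, prefixy in _LEAF.values() for p in prefixy}
--         return tuple(druhy), druhy
--     return tuple(), {}
-- ===== Notes on version B (the rewrite author's own statement) =====
-- stated objective: simpler
-- what changed: Replaces the per-call linear scan of the 27-row VZZ_RADKY table (and A's nested dedup aggregation loop for sum_* rows) with a restructured 14-entry leaf dict oznaceni->(sign,prefixes) plus a tuple of sum-row names: leaf rows are a single dict lookup, sum rows a flat comprehension over the leaf dict (no dedup needed, the prefixes are distinct), and empty rows and misses fall through uniformly to ((), {}).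
import Mathlib
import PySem

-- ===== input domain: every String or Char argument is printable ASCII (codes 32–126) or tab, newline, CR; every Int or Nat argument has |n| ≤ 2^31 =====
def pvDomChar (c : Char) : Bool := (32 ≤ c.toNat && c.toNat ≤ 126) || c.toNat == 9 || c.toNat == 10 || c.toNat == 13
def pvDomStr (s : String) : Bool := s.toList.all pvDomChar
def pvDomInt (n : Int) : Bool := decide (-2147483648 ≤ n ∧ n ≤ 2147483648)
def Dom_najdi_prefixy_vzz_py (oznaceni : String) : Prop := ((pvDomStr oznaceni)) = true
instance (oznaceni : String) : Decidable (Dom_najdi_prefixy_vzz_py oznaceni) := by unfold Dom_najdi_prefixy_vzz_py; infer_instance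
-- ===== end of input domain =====

-- B replaces A's per-call linear table scan (and its nested dedup aggregation for sum_* rows)
-- by a restructured compact leaf table + sum-row list; objective: simpler.

-- ===== PORT A =====
-- The module constant VZZ_RADKY (descriptions kept verbatim).
def vzz_radky : List (String × String × List String × String × Int) :=
  [ ("I.",     "Tržby z prodeje výrobků a služeb",  ["601", "602"], "V", 1),
    ("II.",    "Tržby za zboží",                    ["604"], "V", 1),
    ("A.",     "Výkonová spotřeba",                 [], "N_group", 1),
    ("A.1.",   "  Náklady vynaložené na prodané zboží", ["504"], "N", 2),
    ("A.2.",   "  Spotřeba materiálu a energie",   ["501", "502"], "N", 2),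
    ("A.3.",   "  Služby",                          ["511", "512", "513", "518"], "N", 2),
    ("B.",     "Změna stavu zásob vlastní činnosti", [], "N", 1),
    ("C.",     "Aktivace",                          [], "N", 1),
    ("D.",     "Osobní náklady",                    ["521", "524", "527"], "N", 1),
    ("E.",     "Úpravy hodnot v provozní oblasti",  ["551"], "N", 1),
    ("III.",   "Ostatní provozní výnosy",           ["644", "648"], "V", 1),
    ("F.",     "Ostatní provozní náklady",          ["538", "543", "544", "545", "548", "549"], "N", 1),
    ("*",      "Provozní výsledek hospodaření",     [], "sum_provozni", 1),
    ("IV.",    "Výnosy z dlouhodobého finančního majetku", [], "V", 1),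
    ("G.",     "Náklady vynaložené na prodané podíly", [], "N", 1),
    ("V.",     "Výnosy z ostatního dlouhodobého finančního majetku", [], "V", 1),
    ("H.",     "Náklady související s ostatním DFM", [], "N", 1),
    ("VI.",    "Výnosové úroky a podobné výnosy",   ["662"], "V", 1),
    ("I.",     "Úpravy hodnot a rezervy ve fin. oblasti", [], "N", 1),
    ("J.",     "Nákladové úroky a podobné náklady", ["562"], "N", 1),
    ("VII.",   "Ostatní finanční výnosy",           ["663", "668"], "V", 1),
    ("K.",     "Ostatní finanční náklady",          ["563", "568"], "N", 1),
    ("**fin",  "Finanční výsledek hospodaření",     [], "sum_financni", 1),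
    ("***pred", "Výsledek hospodaření před zdaněním", [], "sum_pred_dani", 1),
    ("L.",     "Daň z příjmů",                      ["591", "595"], "N", 1),
    ("**pod",  "Výsledek hospodaření po zdanění",   [], "sum_po_dani", 1),
    ("****",   "Výsledek hospodaření za účetní období", [], "sum_celkem", 1) ]

-- {p: druh for p in prefixy}, returned as the dict's items (insertion order).
def vzzDictOf (prefixy : List String) (druh : String) : List (String × String) :=
  (prefixy.foldl (fun d p => d.insert p druh) (PySem.Dict.empty)).items

def najdi_prefixy_vzz_py (oznaceni : String) : List String × (List (String × String)) :=
  match vzz_radky.find? (fun r => r.1 == oznaceni) with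
  | none => ([], [])
  | some (_, _, prefixy, druh, _) =>
    if (druh == "V" || druh == "N" || druh == "N_group") && !(prefixy == []) then
      (prefixy, vzzDictOf prefixy druh)
    else if PySem.Str.startswith druh "sum" then
      -- the aggregation loop over all rows, with the 'p not in druhy' check
      let st := vzz_radky.foldl
        (fun (acc : List String × PySem.Dict String String) r =>
          let d := r.2.2.2.1
          if (d == "V" || d == "N" || d == "N_group") && !(r.2.2.1 == []) then
            r.2.2.1.foldl
              (fun acc p =>
                if acc.2.contains p then acc
                else (acc.1 ++ [p], acc.2.insert p d)) acc
          else acc)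
        ([], PySem.Dict.empty)
      (st.1, st.2.items)
    else
      (prefixy, vzzDictOf prefixy druh)

-- ===== PORT B =====
-- Source B's restructured data: leaf rows only, oznaceni ↦ (sign, prefixes), in table order.
def vzzLeaf : PySem.Dict String (String × List String) :=
  PySem.Dict.ofList
    [ ("I.",   ("V", ["601", "602"])),
      ("II.",  ("V", ["604"])),
      ("A.1.", ("N", ["504"])),
      ("A.2.", ("N", ["501", "502"])),
      ("A.3.", ("N", ["511", "512", "513", "518"])),
      ("D.",   ("N", ["521", "524", "527"])),
      ("E.",   ("N", ["551"])),
      ("III.", ("V", ["644", "648"])),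
      ("F.",   ("N", ["538", "543", "544", "545", "548", "549"])),
      ("VI.",  ("V", ["662"])),
      ("J.",   ("N", ["562"])),
      ("VII.", ("V", ["663", "668"])),
      ("K.",   ("N", ["563", "568"])),
      ("L.",   ("N", ["591", "595"])) ]

def vzzSum : List String := ["*", "**fin", "***pred", "**pod", "****"]

def najdi_prefixy_vzz_py_alt (oznaceni : String) : List String × (List (String × String)) :=
  match vzzLeaf.get? oznaceni with
  | some (druh, prefixy) =>
    -- {p: druh for p in prefixy} (dict comprehension → fold of inserts)
    (prefixy, (prefixy.foldl (fun d p => d.insert p druh) PySem.Dict.empty).items)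
  | none =>
    if vzzSum.contains oznaceni then
      -- {p: druh for druh, prefixy in _LEAF.values() for p in prefixy}
      let druhy := vzzLeaf.values.foldl
        (fun d pr => pr.2.foldl (fun d p => d.insert p pr.1) d) PySem.Dict.empty
      (druhy.keys, druhy.items)
    else ([], [])

-- ===== PRECONDITION & SPEC =====
def Spec_najdi_prefixy_vzz_py (oznaceni : String) (out : List String × (List (String × String))) : Prop := out = najdi_prefixy_vzz_py_alt oznaceni
instance (oznaceni : String) (out : List String × (List (String × String))) : Decidable (Spec_najdi_prefixy_vzz_py oznaceni out) := by unfold Spec_najdi_prefixy_vzz_py; infer_instance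

-- ===== CLAIM (what is proved, stated in full; the proofs are below) =====
def Claim_equal_najdi_prefixy_vzz_py : Prop := ∀ (oznaceni : String), Dom_najdi_prefixy_vzz_py oznaceni → Spec_najdi_prefixy_vzz_py oznaceni (najdi_prefixy_vzz_py oznaceni)

-- ===== LEMMAS AND PROOFS =====

-- All names appearing in either program's data (row names; vzzLeaf's and vzzSum's are among them).
def vzz_names : List String :=
  ["I.", "II.", "A.", "A.1.", "A.2.", "A.3.", "B.", "C.", "D.", "E.", "III.", "F.",
   "*", "IV.", "G.", "V.", "H.", "VI.", "J.", "VII.", "K.", "**fin", "***pred",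
   "L.", "**pod", "****"]

theorem vzz_map_fst : vzz_radky.map (fun r => r.1) ⊆ vzz_names := by decide

theorem vzzLeaf_keys_sub : vzzLeaf.keys ⊆ vzz_names := by decide

theorem vzzSum_sub : vzzSum ⊆ vzz_names := by decide

theorem miss_case (oznaceni : String) (h : oznaceni ∉ vzz_names) :
    najdi_prefixy_vzz_py oznaceni = najdi_prefixy_vzz_py_alt oznaceni := by
  have hfind : vzz_radky.find? (fun r => r.1 == oznaceni) = none := by
    cases hf : vzz_radky.find? (fun r => r.1 == oznaceni) with
    | none => rfl
    | some r =>
      have h1 : r.1 = oznaceni := by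
        have := List.find?_some hf; simpa using this
      have h2 : r ∈ vzz_radky := List.mem_of_find?_eq_some hf
      exact absurd (vzz_map_fst (h1 ▸ List.mem_map_of_mem h2)) h
  have hget : vzzLeaf.get? oznaceni = none := by
    rw [PySem.Dict.get?_eq_none_iff_not_mem_keys]
    exact fun hm => h (vzzLeaf_keys_sub hm)
  have hsum : oznaceni ∉ vzzSum := fun hm => h (vzzSum_sub hm)
  simp [najdi_prefixy_vzz_py, najdi_prefixy_vzz_py_alt, hfind, hget, hsum]

set_option maxRecDepth 8192 in
theorem hit_case (oznaceni : String) (h : oznaceni ∈ vzz_names) :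
    najdi_prefixy_vzz_py oznaceni = najdi_prefixy_vzz_py_alt oznaceni := by
  fin_cases h <;> decide

-- ===== VERDICT (by name: the statement is the Claim_ definition above) =====
theorem najdi_prefixy_vzz_py_spec : Claim_equal_najdi_prefixy_vzz_py := by
  intro oznaceni _
  unfold Spec_najdi_prefixy_vzz_py
  by_cases h : oznaceni ∈ vzz_names
  · exact hit_case oznaceni h
  · exact miss_case oznaceni h
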